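-- pv_equiv track=rewrite | github.com/arin17bishwa/myCP_sols | DailyCodingProblem/20250121/20250121.py | func
-- ===== SOURCE A (Python) =====
-- def func(arr: list[str]) -> int:
--     m, n = len(arr), len(arr[0])
--     ans = 0
--     if m == 1:
--         return ans
--
--     for j in range(n):
--         last = arr[0][j]
--         for i in range(1, m):
--             if arr[i][j] < last:
--                 ans += 1
--                 break
--     return ans
-- ===== SOURCE B (Python) =====
-- def func(arr: list[str]) -> int:
--     first = arr[0]
--     n = len(first)
--     bad = set()
--     for row in arr[1:]:
--         for j in range(n):
--             if row[j] < first[j]: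
--                 bad.add(j)
--     return len(bad)
-- ===== Notes on version B (the rewrite author's own statement) =====
-- stated objective: alternative
-- what changed: Traverses the grid row-major instead of column-major: instead of scanning each column downward with an early break, B makes one pass over the rows below the first, collecting into a set every column index where the row's character is below the first row's, and returns the size of that set (no per-column inner scan, no break, no m==1 guard).
-- outside the precondition, e.g. on func(['bb', 'aa', 'a']): A returns 2, B raises IndexError
import Mathlib
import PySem

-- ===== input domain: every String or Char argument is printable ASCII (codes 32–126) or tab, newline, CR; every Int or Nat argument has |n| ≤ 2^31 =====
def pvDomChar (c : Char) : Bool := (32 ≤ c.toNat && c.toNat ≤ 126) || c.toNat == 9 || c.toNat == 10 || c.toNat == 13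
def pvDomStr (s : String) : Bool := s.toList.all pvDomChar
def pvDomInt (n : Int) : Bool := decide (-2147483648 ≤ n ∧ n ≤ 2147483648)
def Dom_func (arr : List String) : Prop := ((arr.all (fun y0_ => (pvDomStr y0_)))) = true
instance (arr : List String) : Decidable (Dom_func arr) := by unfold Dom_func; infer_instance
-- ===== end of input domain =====

-- B traverses the grid row-major with a set of flagged column indices instead of A's
-- column-major scan with an early break (alternative decomposition, same cost).

-- ===== PORT A =====
-- inner 'for i in range(1, m): if arr[i][j] < last: ans += 1; break' — returns whether the break fired
def funcInner (arr : List String) (j : Int) (last : Char) : List Int → Bool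
  | [] => false
  | i :: rest =>
    if (PySem.List.pyGetD (PySem.List.pyGetD arr i "").toList j ' ') < last then true
    else funcInner arr j last rest

def func (arr : List String) : Int :=
  let m : Int := arr.length
  let n : Int := (PySem.List.pyGetD arr 0 "").toList.length
  let ans : Int := 0
  if m == 1 then ans
  else
    (PySem.List.pyRange 0 n 1).foldl (fun ans j =>
      let last := PySem.List.pyGetD (PySem.List.pyGetD arr 0 "").toList j ' '
      if funcInner arr j last (PySem.List.pyRange 1 m 1) then ans + 1 else ans) ans

-- ===== PORT B =====
def func_alt (arr : List String) : Int :=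
  let first := (PySem.List.pyGetD arr 0 "").toList
  let n : Int := first.length
  let bad : PySem.Set Int :=
    (PySem.List.slice arr (some 1) none).foldl
      (fun bad row =>
        (PySem.List.pyRange 0 n 1).foldl
          (fun bad j =>
            if PySem.List.pyGetD row.toList j ' ' < PySem.List.pyGetD first j ' '
            then PySem.Set.add bad j else bad)
          bad)
      PySem.Set.empty
  PySem.Set.len bad

-- ===== PRECONDITION & SPEC =====
-- Pre_ excludes the empty list (A raises IndexError at arr[0]) and ragged inputs with some
-- row shorter than the first row: there both programs usually raise IndexError, but A's early
-- break can skip the short row's missing cell while B's full row pass hits it, so A may return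
-- where B raises (see the cite).
def Pre_func (arr : List String) : Prop :=
  arr ≠ [] ∧ ∀ s ∈ arr, (arr.headD "").length ≤ s.length
instance (arr : List String) : Decidable (Pre_func arr) := by unfold Pre_func; infer_instance
def pvWitness_func : List String := ["ba", "ab", "zz"]

def Spec_func (arr : List String) (out : Int) : Prop := out = func_alt arr
instance (arr : List String) (out : Int) : Decidable (Spec_func arr out) := by unfold Spec_func; infer_instance

-- ===== CLAIM =====
def Claim_equal_func : Prop := ∀ (arr : List String), Dom_func arr → Pre_func arr → Spec_func arr (func arr)

-- ===== LEMMAS AND PROOFS =====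

theorem funcInner_eq_any (arr : List String) (j : Int) (last : Char) (l : List Int) :
    funcInner arr j last l
      = l.any (fun i => (PySem.List.pyGetD (PySem.List.pyGetD arr i "").toList j ' ') < last) := by
  induction l with
  | nil => rfl
  | cons i rest ih => simp only [funcInner, ih, List.any_cons]; split_ifs <;> simp_all

-- membership after the inner row pass
theorem mem_inner_fold (c : Int → Prop) [DecidablePred c] (l : List Int) (s : PySem.Set Int) (y : Int) :
    (y ∈ l.foldl (fun s j => if c j then PySem.Set.add s j else s) s)
      ↔ (y ∈ s ∨ (y ∈ l ∧ c y)) := by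
  induction l generalizing s with
  | nil => simp
  | cons x xs ih =>
      simp only [List.foldl_cons, ih, List.mem_cons]
      by_cases hx : c x
      · simp only [hx, if_pos, PySem.Set.mem_add]
        constructor
        · rintro (⟨h | rfl⟩ | ⟨h, hc⟩)
          · exact Or.inl h
          · exact Or.inr ⟨Or.inl rfl, hx⟩
          · exact Or.inr ⟨Or.inr h, hc⟩
        · rintro (h | ⟨rfl | h, hc⟩)
          · exact Or.inl (Or.inl h)
          · exact Or.inl (Or.inr rfl)
          · exact Or.inr ⟨h, hc⟩
      · simp only [if_neg hx]
        constructor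
        · rintro (h | ⟨h, hc⟩)
          · exact Or.inl h
          · exact Or.inr ⟨Or.inr h, hc⟩
        · rintro (h | ⟨rfl | h, hc⟩)
          · exact Or.inl h
          · exact absurd hc hx
          · exact Or.inr ⟨h, hc⟩

theorem nodup_inner_fold (c : Int → Prop) [DecidablePred c] (l : List Int) (s : PySem.Set Int) (hs : s.Nodup) :
    (l.foldl (fun s j => if c j then PySem.Set.add s j else s) s).Nodup := by
  induction l generalizing s with
  | nil => exact hs
  | cons x xs ih =>
      simp only [List.foldl_cons]
      split_ifs
      · exact ih _ (PySem.Set.nodup_add _ _ hs)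
      · exact ih _ hs

-- membership after the whole row-major pass
theorem mem_outer_fold (cond : String → Int → Prop) [∀ r j, Decidable (cond r j)] (js : List Int)
    (rows : List String) (s : PySem.Set Int) (y : Int) :
    (y ∈ rows.foldl
        (fun s row => js.foldl (fun s j => if cond row j then PySem.Set.add s j else s) s) s)
      ↔ (y ∈ s ∨ (y ∈ js ∧ ∃ row ∈ rows, cond row y)) := by
  induction rows generalizing s with
  | nil => simp
  | cons r rs ih =>
      simp only [List.foldl_cons, ih, mem_inner_fold, List.mem_cons]
      constructor
      · rintro ((h | ⟨hj, hc⟩) | ⟨hj, row, hrow, hc⟩)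
        · exact Or.inl h
        · exact Or.inr ⟨hj, r, Or.inl rfl, hc⟩
        · exact Or.inr ⟨hj, row, Or.inr hrow, hc⟩
      · rintro (h | ⟨hj, row, hrow | hrow, hc⟩)
        · exact Or.inl (Or.inl h)
        · subst hrow; exact Or.inl (Or.inr ⟨hj, hc⟩)
        · exact Or.inr ⟨hj, row, hrow, hc⟩

theorem nodup_outer_fold (cond : String → Int → Prop) [∀ r j, Decidable (cond r j)] (js : List Int)
    (rows : List String) (s : PySem.Set Int) (hs : s.Nodup) :
    (rows.foldl
        (fun s row => js.foldl (fun s j => if cond row j then PySem.Set.add s j else s) s) s).Nodup := by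
  induction rows generalizing s with
  | nil => exact hs
  | cons r rs ih => exact ih _ (nodup_inner_fold _ _ _ hs)

theorem main_eq (arr : List String) (hpre : Pre_func arr) : func arr = func_alt arr := by
  obtain ⟨hne, hlen⟩ := hpre
  obtain ⟨a0, rest, rfl⟩ : ∃ a b, arr = a :: b := by
    cases arr with | nil => exact absurd rfl hne | cons a b => exact ⟨a, b, rfl⟩
  have hB : func_alt (a0 :: rest)
      = (PySem.Set.len ((rest : List String).foldl
          (fun s row => (PySem.List.pyRange 0 (a0.toList.length : Int) 1).foldl
            (fun s j => if PySem.List.pyGetD row.toList j ' ' < PySem.List.pyGetD a0.toList j ' '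
              then PySem.Set.add s j else s) s) PySem.Set.empty) : Int) := by
    simp only [func_alt, PySem.List.pyGetD_zero_cons, PySem.List.slice_from_one, List.tail_cons]
  -- the predicate on a column index
  set P : Int → Bool := fun j =>
    rest.any (fun row => PySem.List.pyGetD row.toList j ' ' < PySem.List.pyGetD a0.toList j ' ')
    with hP
  have hbadmem : ∀ y, (y ∈ (rest : List String).foldl
          (fun s row => (PySem.List.pyRange 0 (a0.toList.length : Int) 1).foldl
            (fun s j => if PySem.List.pyGetD row.toList j ' ' < PySem.List.pyGetD a0.toList j ' '
              then PySem.Set.add s j else s) s) PySem.Set.empty)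
        ↔ (y ∈ (PySem.List.pyRange 0 (a0.toList.length : Int) 1).filter P) := by
    intro y
    rw [mem_outer_fold (cond := fun row j =>
          PySem.List.pyGetD row.toList j ' ' < PySem.List.pyGetD a0.toList j ' ')]
    simp only [PySem.Set.empty, List.not_mem_nil, false_or, List.mem_filter, hP,
      List.any_eq_true, decide_eq_true_eq]
  have hbadnodup : ((rest : List String).foldl
          (fun s row => (PySem.List.pyRange 0 (a0.toList.length : Int) 1).foldl
            (fun s j => if PySem.List.pyGetD row.toList j ' ' < PySem.List.pyGetD a0.toList j ' '
              then PySem.Set.add s j else s) s) PySem.Set.empty).Nodup :=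
    nodup_outer_fold _ _ _ _ List.nodup_nil
  have hperm : ((rest : List String).foldl
          (fun s row => (PySem.List.pyRange 0 (a0.toList.length : Int) 1).foldl
            (fun s j => if PySem.List.pyGetD row.toList j ' ' < PySem.List.pyGetD a0.toList j ' '
              then PySem.Set.add s j else s) s) PySem.Set.empty).Perm
        ((PySem.List.pyRange 0 (a0.toList.length : Int) 1).filter P) := by
    rw [List.perm_ext_iff_of_nodup hbadnodup
      ((PySem.List.nodup_pyRange_one _ _).filter _)]
    exact hbadmem
  have hBlen : func_alt (a0 :: rest)
      = (((PySem.List.pyRange 0 (a0.toList.length : Int) 1).filter P).length : Int) := by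
    rw [hB]
    simp only [PySem.Set.len, hperm.length_eq]
  -- A side
  cases rest with
  | nil =>
      simp only [func, hBlen, List.length_cons, List.length_nil]
      norm_num [hP, PySem.List.pyRange_one]
  | cons r1 rs =>
    rw [hBlen]
    simp only [func, PySem.List.pyGetD_zero_cons]
    have hcond : ¬ (((((r1 :: rs).length + 1 : Nat) : Int)) == 1) = true := by
      simp only [beq_iff_eq, List.length_cons]; push_cast; omega
    rw [show ((((a0 :: r1 :: rs).length : Nat) : Int)) = (((r1 :: rs).length + 1 : Nat) : Int) by simp]
    rw [if_neg hcond]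
    have hanyi : ∀ j : Int,
        funcInner (a0 :: r1 :: rs) j (PySem.List.pyGetD a0.toList j ' ')
          (PySem.List.pyRange 1 (((r1 :: rs).length + 1 : Nat) : Int) 1) = P j := by
      intro j
      rw [funcInner_eq_any]
      have hlenc : (((r1 :: rs).length + 1 : Nat) : Int) = (((a0 :: r1 :: rs).length : Nat) : Int) := by
        simp
      rw [hlenc]
      have hdrop : (PySem.List.pyRange 1 (((a0 :: r1 :: rs).length : Nat) : Int) 1).map
          (fun i => PySem.List.pyGetD (a0 :: r1 :: rs) i "") = r1 :: rs := by
        rw [PySem.List.map_pyGetD_pyRange' (xs := a0 :: r1 :: rs) (d := "") (a := 1) (by norm_num)]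
        rfl
      rw [show (fun i => decide
            (PySem.List.pyGetD (PySem.List.pyGetD (a0 :: r1 :: rs) i "").toList j ' ' <
              PySem.List.pyGetD a0.toList j ' '))
          = ((fun s : String => decide
            (PySem.List.pyGetD s.toList j ' ' <
              PySem.List.pyGetD a0.toList j ' ')) ∘
            (fun i => PySem.List.pyGetD (a0 :: r1 :: rs) i "")) from rfl,
        ← List.any_map, hdrop, hP]
    calc (PySem.List.pyRange 0 (a0.toList.length : Int) 1).foldl
          (fun ans j => if funcInner (a0 :: r1 :: rs) j (PySem.List.pyGetD a0.toList j ' ')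
              (PySem.List.pyRange 1 (((r1 :: rs).length + 1 : Nat) : Int) 1) then ans + 1 else ans) 0
        = (PySem.List.pyRange 0 (a0.toList.length : Int) 1).foldl
          (fun ans j => if P j then ans + 1 else ans) 0 := by
          apply PySem.List.foldl_congr_mem
          intro acc j hj
          rw [hanyi j]
      _ = 0 + (((PySem.List.pyRange 0 (a0.toList.length : Int) 1).countP P : Nat) : Int) :=
          PySem.List.foldl_if_add_one P _ 0
      _ = (((PySem.List.pyRange 0 (a0.toList.length : Int) 1).filter P).length : Int) := by
          rw [List.countP_eq_length_filter]; omega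

-- ===== VERDICT =====
theorem func_spec : Claim_equal_func := by
  intro arr _ hpre
  exact main_eq arr hpre
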